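-- pv_equiv track=rewrite | github.com/Ulewsky/Codility_task | Programs/task_1.py | solution
-- ===== SOURCE A (Python) =====
-- def solution(A):
--     p = [0]
--     n = [0]
--     for i in range(0,len(A)):
--         if A[i] % 2 == 0:
--             p.append(A[i])
--         else:
--             n.append(A[i])
--     return max(p)+max(n)
-- ===== SOURCE B (Python) =====
-- def solution(A):
--     even_max = 0
--     odd_max = 0
--     for x in A:
--         if x % 2 == 0:
--             if x > even_max:
--                 even_max = x
--         else:
--             if x > odd_max:
--                 odd_max = x
--     return even_max + odd_max
-- ===== Notes on version B (the rewrite author's own statement) =====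
-- stated objective: simpler
-- what changed: Replaces building two 0-seeded lists plus two max() scans with a single pass that maintains two integer running maxima (both floored at 0) and returns their sum.
import Mathlib
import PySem

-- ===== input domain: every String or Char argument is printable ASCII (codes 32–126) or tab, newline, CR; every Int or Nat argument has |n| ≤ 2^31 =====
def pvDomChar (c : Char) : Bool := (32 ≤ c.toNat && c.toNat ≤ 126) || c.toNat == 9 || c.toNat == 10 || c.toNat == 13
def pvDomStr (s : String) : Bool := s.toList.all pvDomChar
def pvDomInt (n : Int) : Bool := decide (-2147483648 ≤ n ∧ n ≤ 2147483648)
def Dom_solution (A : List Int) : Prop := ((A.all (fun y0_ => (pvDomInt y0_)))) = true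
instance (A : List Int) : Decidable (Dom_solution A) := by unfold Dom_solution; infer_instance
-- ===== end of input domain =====

-- B replaces A's two 0-seeded lists + two max() scans by one pass with two integer running maxima (O(1) space).

-- ===== PORT A =====
def solution (A : List Int) : Int :=
  let st := (PySem.List.pyRange 0 (PySem.List.len A) 1).foldl
    (fun (pn : List Int × List Int) i =>
      let x := PySem.List.pyGetD A i 0
      if PySem.Int.mod x 2 == 0 then (pn.1 ++ [x], pn.2) else (pn.1, pn.2 ++ [x]))
    ([0], [0])
  (PySem.List.max? st.1 (fun y => y)).getD 0 + (PySem.List.max? st.2 (fun y => y)).getD 0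

-- ===== PORT B =====
def solution_alt (A : List Int) : Int :=
  let st := A.foldl
    (fun (st : Int × Int) x =>
      if PySem.Int.mod x 2 == 0 then
        (if x > st.1 then (x, st.2) else st)
      else
        (if x > st.2 then (st.1, x) else st))
    (0, 0)
  st.1 + st.2

-- ===== PRECONDITION & SPEC =====
def Spec_solution (A : List Int) (out : Int) : Prop := out = solution_alt A
instance (A : List Int) (out : Int) : Decidable (Spec_solution A out) := by unfold Spec_solution; infer_instance

-- ===== CLAIM (what is proved, stated in full; the proofs are below) =====
def Claim_equal_solution : Prop := ∀ (A : List Int), Dom_solution A → Spec_solution A (solution A)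

-- ===== LEMMAS AND PROOFS =====

-- Python max(l + [x]) versus running-max update, for nonempty l.
lemma maxApp (p : List Int) (x : Int) (hp : p ≠ []) :
    (PySem.List.max? (p ++ [x]) (fun y => y)).getD 0
      = if x > (PySem.List.max? p (fun y => y)).getD 0 then x
        else (PySem.List.max? p (fun y => y)).getD 0 := by
  cases h : PySem.List.max? p (fun y => y) with
  | none => exact absurd ((PySem.List.max?_eq_none_iff _ _).mp h) hp
  | some m =>
    have hstep : PySem.List.max? (p ++ [x]) (fun y => y)
        = if m < x then some x else some m := by
      unfold PySem.List.max? at h ⊢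
      rw [List.foldl_append, h]
      simp [List.foldl]
    rw [hstep]
    by_cases hmx : m < x
    · simp [hmx, gt_iff_lt]
    · simp [hmx, gt_iff_lt]

lemma max?_append_ne_nil (p : List Int) (x : Int) : p ++ [x] ≠ [] := by
  simp

-- Invariant: A's list-building fold followed by the two max scans equals B's running-max fold.
lemma invariant (A : List Int) : ∀ (p n : List Int), p ≠ [] → n ≠ [] →
    (let st := A.foldl
        (fun (pn : List Int × List Int) x =>
          if PySem.Int.mod x 2 == 0 then (pn.1 ++ [x], pn.2) else (pn.1, pn.2 ++ [x]))
        (p, n)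
     ((PySem.List.max? st.1 (fun y => y)).getD 0, (PySem.List.max? st.2 (fun y => y)).getD 0))
      = A.foldl
          (fun (st : Int × Int) x =>
            if PySem.Int.mod x 2 == 0 then
              (if x > st.1 then (x, st.2) else st)
            else
              (if x > st.2 then (st.1, x) else st))
          ((PySem.List.max? p (fun y => y)).getD 0, (PySem.List.max? n (fun y => y)).getD 0) := by
  induction A with
  | nil => intro p n hp hn; simp
  | cons x A ih =>
    intro p n hp hn
    by_cases hx : PySem.Int.mod x 2 == 0
    · simp only [List.foldl_cons, if_pos hx]
      rw [ih (p ++ [x]) n (max?_append_ne_nil p x) hn]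
      rw [maxApp p x hp]
      by_cases hgt : x > (PySem.List.max? p (fun y => y)).getD 0
      · simp [hgt]
      · simp [hgt]
    · simp only [List.foldl_cons, if_neg hx]
      rw [ih p (n ++ [x]) hp (max?_append_ne_nil n x)]
      rw [maxApp n x hn]
      by_cases hgt : x > (PySem.List.max? n (fun y => y)).getD 0
      · simp [hgt]
      · simp [hgt]

-- ===== VERDICT (by name: the statement is the Claim_ definition above) =====
theorem solution_spec : Claim_equal_solution := by
  intro A _
  unfold Spec_solution solution solution_alt
  have hfold : (PySem.List.pyRange 0 (PySem.List.len A) 1).foldl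
      (fun (pn : List Int × List Int) i =>
        let x := PySem.List.pyGetD A i 0
        if PySem.Int.mod x 2 == 0 then (pn.1 ++ [x], pn.2) else (pn.1, pn.2 ++ [x]))
      ([0], [0])
      = A.foldl (fun (pn : List Int × List Int) x =>
          if PySem.Int.mod x 2 == 0 then (pn.1 ++ [x], pn.2) else (pn.1, pn.2 ++ [x]))
          ([0], [0]) :=
    PySem.List.foldl_pyRange_zero_pyGetD A 0
      (fun (pn : List Int × List Int) x =>
        if PySem.Int.mod x 2 == 0 then (pn.1 ++ [x], pn.2) else (pn.1, pn.2 ++ [x]))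
      ([0], [0])
  simp only [hfold]
  have h := invariant A [0] [0] (by simp) (by simp)
  simp only at h
  have h1 := congrArg Prod.fst h
  have h2 := congrArg Prod.snd h
  simp only at h1 h2
  have hm : (PySem.List.max? [(0 : Int)] (fun y => y)).getD 0 = 0 := by decide
  rw [hm] at h1 h2
  rw [h1, h2]
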